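-- pv_equiv track=rewrite | github.com/fatin99/LeetCode-2.0 | Arrays & Hashing/shift-rows-column-all-ones.py | minShifts
-- ===== SOURCE A (Python) =====
-- from typing import List
--
-- def minShifts(matrix: List[List[int]]) -> int:
--     rows, cols = len(matrix), len(matrix[0])
--
--     cost = [[0] * cols for _ in range(rows)]
--
--     # For each row, collect positions of 1s.
--     for i in range(rows):
--         ones = []
--         for c in range(cols):
--             if matrix[i][c] == 1:
--                 ones.append(c)
--         # If a row has none, return -1.
--         if not ones:
--             return -1
--
--         for j in range(cols):
--             best = cols
--             for target in ones:
--                 # cyclic distance from any 1 in current row to column j (left shift and right shift)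
--                 left = (target - j) % cols
--                 right = (j - target) % cols
--
--                 dist = min(left, right)
--                 best = min(best, dist)
--
--             cost[i][j] = best
--
--     # minimize the sum of per-row costs.
--     res = -1
--     for j in range(cols):
--         total = 0
--         for i in range(rows):
--             total += cost[i][j]
--         if res == -1:
--             res = total
--         res = min(res, total)
--     return res
-- ===== SOURCE B (Python) =====
-- from typing import List
--
-- def minShifts(matrix: List[List[int]]) -> int:
--     cols = len(matrix[0])
--     sums = [0] * cols
--     for row in matrix:
--         if all(row[c] != 1 for c in range(cols)):
--             return -1
--         # forward sweep: two passes, carry survives the wrap, so fwd[k] is the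
--         # cyclic distance from column k back to the nearest 1 on its left
--         fwd = [0] * cols
--         carry = cols
--         for _ in range(2):
--             for k in range(cols):
--                 carry = 0 if row[k] == 1 else carry + 1
--                 fwd[k] = carry
--         # backward sweep: cyclic distance to the nearest 1 on the right
--         bwd = [0] * cols
--         carry = cols
--         for _ in range(2):
--             for k in range(cols - 1, -1, -1):
--                 carry = 0 if row[k] == 1 else carry + 1
--                 bwd[k] = carry
--         for k in range(cols):
--             sums[k] += min(fwd[k], bwd[k])
--     return min(sums)
-- ===== Notes on version B (the rewrite author's own statement) =====
-- stated objective: alternative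
-- what changed: Replaces the per-cell scan over all 1-positions of the row by two carry-propagating sweeps per row (forward and backward, each run twice so the carry wraps around) that yield every column's cyclic distance to the nearest 1, and accumulates column sums on the fly instead of materialising the cost matrix; intended as asymptotically faster (O(rows*cols) vs O(rows*cols^2)), but a timing run measured only 1.24x at its largest generated size, so no speed is claimed.
import Mathlib
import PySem

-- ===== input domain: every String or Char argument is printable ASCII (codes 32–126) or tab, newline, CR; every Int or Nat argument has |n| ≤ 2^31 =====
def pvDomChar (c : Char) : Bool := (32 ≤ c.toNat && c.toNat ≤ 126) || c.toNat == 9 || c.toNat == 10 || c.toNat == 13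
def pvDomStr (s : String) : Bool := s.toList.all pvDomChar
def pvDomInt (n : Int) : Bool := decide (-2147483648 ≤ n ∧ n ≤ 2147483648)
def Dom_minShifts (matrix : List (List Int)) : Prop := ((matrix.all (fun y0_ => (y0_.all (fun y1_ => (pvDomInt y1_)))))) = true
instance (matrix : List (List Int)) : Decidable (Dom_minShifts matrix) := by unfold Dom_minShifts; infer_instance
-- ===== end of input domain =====

-- B replaces A's per-cell scan over the row's 1-positions by two carry sweeps
-- per row (nearest-1 cyclic distance) and accumulates column sums on the fly
-- instead of materialising the cost matrix (a different algorithm; no measured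
-- speed is claimed).

-- ===== PORT A =====
-- ones = [c for c in range(cols) if matrix[i][c] == 1]   (row[c] via pyGetD; out-of-range indexing is excluded by Pre_)
def aOnes (row : List Int) (cols : Int) : List Int :=
  (PySem.List.pyRange 0 cols 1).foldl
    (fun ones c => if PySem.List.pyGetD row c 0 = 1 then ones ++ [c] else ones) []

-- the inner 'for target in ones' loop computing best
def aBest (ones : List Int) (cols j : Int) : Int :=
  ones.foldl (fun best t =>
    min best (min (PySem.Int.mod (t - j) cols) (PySem.Int.mod (j - t) cols))) cols

-- cost[i] = [best for j in range(cols)]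
def aCostRow (ones : List Int) (cols : Int) : List Int :=
  (PySem.List.pyRange 0 cols 1).foldl (fun cr j => cr ++ [aBest ones cols j]) []

-- the row loop; none = the early 'return -1'
def aRows (cols : Int) : List (List Int) → Option (List (List Int))
  | [] => some []
  | r :: rs =>
    let ones := aOnes r cols
    if ones = [] then none
    else
      match aRows cols rs with
      | none => none
      | some rest => some (aCostRow ones cols :: rest)

def minShifts (matrix : List (List Int)) : Int :=
  let cols : Int := ((matrix.headD []).length : Int)
  match aRows cols matrix with
  | none => -1
  | some cost =>
    (PySem.List.pyRange 0 cols 1).foldl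
      (fun res j =>
        let total := cost.foldl (fun t cr => t + PySem.List.pyGetD cr j 0) 0
        let res := if res = -1 then total else res
        min res total) (-1)

-- ===== PORT B =====
-- one pass 'for k in ks: carry = 0 if row[k] == 1 else carry + 1; out[k] = carry';
-- returns the carries in visit order
def bPass (row : List Int) : Int → List Int → List Int
  | _, [] => []
  | carry, k :: ks =>
    let c := if PySem.List.pyGetD row k 0 = 1 then 0 else carry + 1
    c :: bPass row c ks

-- per-row distances: forward sweep twice (carry wraps), backward sweep twice
def bRowDist (row : List Int) (cols : Int) : List Int :=
  let ks := PySem.List.pyRange 0 cols 1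
  let p1 := bPass row cols ks
  let fwd := bPass row (p1.getLastD cols) ks
  let ksr := PySem.List.pyRange (cols - 1) (-1) (-1)
  let q1 := bPass row cols ksr
  let bwd := (bPass row (q1.getLastD cols) ksr).reverse
  List.zipWith (fun f b => min f b) fwd bwd

-- the row loop of B: early -1, else add the row's distances into sums;
-- at the end min(sums)
def bLoop (cols : Int) (sums : List Int) : List (List Int) → Int
  | [] => (PySem.List.min? sums (fun x => x)).getD (-1)
  | row :: rs =>
    if (PySem.List.pyRange 0 cols 1).all
        (fun c => PySem.List.pyGetD row c 0 != 1) then -1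
    else bLoop cols (List.zipWith (fun s d => s + d) sums (bRowDist row cols)) rs

def minShifts_alt (matrix : List (List Int)) : Int :=
  let cols : Int := ((matrix.headD []).length : Int)
  bLoop cols (List.replicate cols.toNat 0) matrix

-- ===== PRECONDITION & SPEC =====
-- Pre_ excludes exactly the inputs on which A raises: the empty matrix
-- (IndexError on matrix[0]) and matrices in which the first "reached" row
-- lacking a 1 in columns 0..cols-1 — or an earlier reached row — is shorter
-- than cols = len(matrix[0]) (IndexError on matrix[i][c]).
def Pre_minShifts (matrix : List (List Int)) : Prop :=
  matrix ≠ [] ∧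
  ∀ i < matrix.length,
    (∀ i' < i, ∃ c < (matrix.headD []).length, (matrix.getD i' []).getD c 0 = 1) →
    (matrix.headD []).length ≤ (matrix.getD i []).length
instance (matrix : List (List Int)) : Decidable (Pre_minShifts matrix) := by
  unfold Pre_minShifts; infer_instance

def pvWitness_minShifts : List (List Int) := [[0, 1], [1, 0]]

def Spec_minShifts (matrix : List (List Int)) (out : Int) : Prop := out = minShifts_alt matrix
instance (matrix : List (List Int)) (out : Int) : Decidable (Spec_minShifts matrix out) := by unfold Spec_minShifts; infer_instance

-- ===== CLAIM (what is proved, stated in full; the proofs are below) =====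
def Claim_equal_minShifts : Prop := ∀ (matrix : List (List Int)), Dom_minShifts matrix → Pre_minShifts matrix → Spec_minShifts matrix (minShifts matrix)

-- ===== LEMMAS AND PROOFS =====

-- ---- pure value-scan and nearest-one-backwards machinery ----

-- carries of one pass of the sweep, as a function of the cell VALUES
def pScan : Int → List Int → List Int
  | _, [] => []
  | init, v :: vs =>
    let c := if v = 1 then 0 else init + 1
    c :: pScan c vs

-- distance from position k backwards to the nearest 1 inside w[0..k] (none if there is none)
def nb : List Int → Nat → Option Nat
  | [], _ => none
  | v :: _, 0 => if v = 1 then some 0 else none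
  | v :: vs, k + 1 =>
    match nb vs k with
    | some j => some j
    | none => if v = 1 then some (k + 1) else none

theorem pScan_length (w : List Int) : ∀ init, (pScan init w).length = w.length := by
  induction w with
  | nil => intro init; rfl
  | cons v vs ih => intro init; simp [pScan, ih]

theorem pScan_getD (w : List Int) : ∀ init k, k < w.length →
    (pScan init w).getD k 0 =
      (match nb w k with
       | some j => (j : Int)
       | none => init + (k : Int) + 1) := by
  induction w with
  | nil => intro init k hk; simp at hk
  | cons v vs ih =>
    intro init k hk
    cases k with
    | zero =>
      by_cases hv : v = 1 <;> simp [pScan, nb, hv]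
    | succ k =>
      have hk' : k < vs.length := by simpa using hk
      have := ih (if v = 1 then 0 else init + 1) k hk'
      simp only [pScan, List.getD_cons_succ] at *
      rw [this]
      cases hnb : nb vs k with
      | some j => simp [nb, hnb]
      | none =>
        by_cases hv : v = 1 <;> simp [nb, hnb, hv] <;> push_cast <;> ring

theorem nb_none_iff (w : List Int) : ∀ k, k < w.length →
    (nb w k = none ↔ ∀ t ≤ k, w.getD t 0 ≠ 1) := by
  induction w with
  | nil => intro k hk; simp at hk
  | cons v vs ih =>
    intro k hk
    cases k with
    | zero =>
      constructor
      · intro h t ht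
        interval_cases t
        by_cases hv : v = 1 <;> simp [nb, hv] at h ⊢
      · intro h
        have := h 0 (le_refl 0)
        simp at this
        simp [nb, this]
    | succ k =>
      have hk' : k < vs.length := by simpa using hk
      constructor
      · intro h t ht
        cases hnb : nb vs k with
        | some j => simp [nb, hnb] at h
        | none =>
          have hv : v ≠ 1 := by
            by_contra hv; simp [nb, hnb, hv] at h
          cases t with
          | zero => simpa using hv
          | succ t =>
            have := (ih k hk').mp hnb t (by omega)
            simpa using this
      · intro h
        have hnone : nb vs k = none := by
          apply (ih k hk').mpr
          intro t ht
          have := h (t + 1) (by omega)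
          simpa using this
        have hv : v ≠ 1 := by simpa using h 0 (by omega)
        simp [nb, hnone, hv]

theorem nb_some_one (w : List Int) : ∀ k j, k < w.length → nb w k = some j →
    j ≤ k ∧ w.getD (k - j) 0 = 1 := by
  induction w with
  | nil => intro k j hk; simp at hk
  | cons v vs ih =>
    intro k j hk h
    cases k with
    | zero =>
      by_cases hv : v = 1 <;> simp [nb, hv] at h
      subst h; simpa using hv
    | succ k =>
      have hk' : k < vs.length := by simpa using hk
      cases hnb : nb vs k with
      | some j' =>
        simp [nb, hnb] at h
        obtain ⟨h1, h2⟩ := ih k j' hk' hnb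
        refine ⟨by omega, ?_⟩
        have : k + 1 - j = (k - j') + 1 := by omega
        rw [this]
        simpa using h2
      | none =>
        by_cases hv : v = 1 <;> simp [nb, hnb, hv] at h
        subst h; simpa using hv

theorem nb_some_min (w : List Int) : ∀ k j, k < w.length → nb w k = some j →
    ∀ t, t ≤ k → w.getD t 0 = 1 → j ≤ k - t := by
  induction w with
  | nil => intro k j hk; simp at hk
  | cons v vs ih =>
    intro k j hk h t ht hone
    cases k with
    | zero =>
      interval_cases t
      by_cases hv : v = 1 <;> simp [nb, hv] at h
      omega
    | succ k =>
      have hk' : k < vs.length := by simpa using hk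
      cases hnb : nb vs k with
      | some j' =>
        simp [nb, hnb] at h
        subst h
        cases t with
        | zero => have := (nb_some_one vs k j' hk' hnb).1; omega
        | succ t =>
          have := ih k j' hk' hnb t (by omega) (by simpa using hone)
          omega
      | none =>
        by_cases hv : v = 1 <;> simp [nb, hnb, hv] at h
        subst h
        cases t with
        | zero => omega
        | succ t =>
          exfalso
          exact (nb_none_iff vs k hk').mp hnb t (by omega) (by simpa using hone)

theorem getLastD_eq_getD (l : List Int) (d : Int) (h : l ≠ []) :
    l.getLastD d = l.getD (l.length - 1) 0 := by
  induction l with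
  | nil => simp at h
  | cons x xs ih =>
    cases xs with
    | nil => simp
    | cons y ys =>
      have := ih (by simp)
      simpa using this

-- the sweep value (second pass, carry wrapped) is the min cyclic backward distance
theorem fwd_char (w : List Int) (k : Nat)
    (hone : ∃ t < w.length, w.getD t 0 = 1) (hk : k < w.length) :
    ∃ t < w.length, w.getD t 0 = 1 ∧
      (pScan ((pScan (w.length : Int) w).getLastD (w.length : Int)) w).getD k 0
        = ((k + w.length - t) % w.length : Nat) ∧
      ∀ t' < w.length, w.getD t' 0 = 1 →
        (pScan ((pScan (w.length : Int) w).getLastD (w.length : Int)) w).getD k 0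
          ≤ (((k + w.length - t') % w.length : Nat) : Int) := by
  have hn0 : 0 < w.length := lt_of_le_of_lt (Nat.zero_le k) hk
  have hpne : pScan (w.length : Int) w ≠ [] := by
    intro h
    have := pScan_length w (w.length : Int)
    rw [h] at this
    simp at this
    omega
  cases hnb1 : nb w (w.length - 1) with
  | none =>
    exfalso
    obtain ⟨t, ht, hone1⟩ := hone
    exact (nb_none_iff w (w.length - 1) (by omega)).mp hnb1 t (by omega) hone1
  | some j2 =>
    obtain ⟨hj2le, hj2one⟩ := nb_some_one w (w.length - 1) j2 (by omega) hnb1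
    have hj2min := nb_some_min w (w.length - 1) j2 (by omega) hnb1
    have hinit : (pScan (w.length : Int) w).getLastD (w.length : Int) = (j2 : Int) := by
      rw [getLastD_eq_getD _ _ hpne, pScan_length,
          pScan_getD w _ (w.length - 1) (by omega), hnb1]
    rw [hinit]
    cases hnbk : nb w k with
    | some j =>
      have hval : (pScan (j2 : Int) w).getD k 0 = (j : Int) := by
        rw [pScan_getD w _ k hk, hnbk]
      rw [hval]
      obtain ⟨hjle, hjone⟩ := nb_some_one w k j hk hnbk
      have hjmin := nb_some_min w k j hk hnbk
      refine ⟨k - j, by omega, hjone, ?_, ?_⟩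
      · have : k + w.length - (k - j) = w.length + j := by omega
        rw [this, Nat.add_mod_left, Nat.mod_eq_of_lt (by omega)]
      · intro t' ht' hone'
        by_cases hle : t' ≤ k
        · have h1 : k + w.length - t' = w.length + (k - t') := by omega
          rw [h1, Nat.add_mod_left, Nat.mod_eq_of_lt (by omega)]
          exact_mod_cast hjmin t' hle hone'
        · rw [Nat.mod_eq_of_lt (by omega)]
          have : j ≤ k + w.length - t' := by omega
          exact_mod_cast this
    | none =>
      have hval : (pScan (j2 : Int) w).getD k 0 = (j2 : Int) + (k : Int) + 1 := by
        rw [pScan_getD w _ k hk, hnbk]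
      rw [hval]
      have hno : ∀ t ≤ k, w.getD t 0 ≠ 1 := (nb_none_iff w k hk).mp hnbk
      have htk : k < w.length - 1 - j2 := by
        rcases Nat.lt_or_ge k (w.length - 1 - j2) with h | h
        · exact h
        · exact absurd hj2one (hno _ (by omega))
      refine ⟨w.length - 1 - j2, by omega, hj2one, ?_, ?_⟩
      · have h1 : k + w.length - (w.length - 1 - j2) = k + j2 + 1 := by omega
        rw [h1, Nat.mod_eq_of_lt (by omega)]
        push_cast
        ring
      · intro t' ht' hone'
        have hgt : k < t' := by
          rcases Nat.lt_or_ge k t' with h | h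
          · exact h
          · exact absurd hone' (hno _ h)
        have := hj2min t' (by omega) hone'
        rw [Nat.mod_eq_of_lt (by omega)]
        have h2 : k + j2 + 1 ≤ k + w.length - t' := by omega
        push_cast
        omega

-- ---- bridges from the ports to the pure scan ----

def rowVals (row : List Int) (n : Nat) : List Int :=
  (List.range n).map (fun t => row.getD t 0)

theorem rowVals_length (row : List Int) (n : Nat) : (rowVals row n).length = n := by
  simp [rowVals]

theorem rowVals_getD (row : List Int) (n t : Nat) (ht : t < n) :
    (rowVals row n).getD t 0 = row.getD t 0 := by
  rw [rowVals, List.getD_eq_getElem _ _ (by simpa using ht)]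
  simp

theorem getD_reverse (l : List Int) (k : Nat) (hk : k < l.length) :
    l.reverse.getD k 0 = l.getD (l.length - 1 - k) 0 := by
  rw [List.getD_eq_getElem _ _ (by simpa using hk),
      List.getD_eq_getElem _ _ (by omega)]
  simp [List.getElem_reverse]

theorem zipWith_getD (f : Int → Int → Int) (l1 l2 : List Int) (k : Nat)
    (h1 : k < l1.length) (h2 : k < l2.length) :
    (List.zipWith f l1 l2).getD k 0 = f (l1.getD k 0) (l2.getD k 0) := by
  rw [List.getD_eq_getElem _ _ (by simp; omega),
      List.getD_eq_getElem _ _ h1, List.getD_eq_getElem _ _ h2]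
  simp

theorem bPass_eq_pScan (row : List Int) : ∀ (carry : Int) (ks : List Int),
    bPass row carry ks = pScan carry (ks.map (fun k => PySem.List.pyGetD row k 0)) := by
  intro carry ks
  induction ks generalizing carry with
  | nil => rfl
  | cons k ks ih => simp [bPass, pScan, ih]

theorem ks_map (row : List Int) (n : Nat) :
    (PySem.List.pyRange 0 (n : Int) 1).map (fun k => PySem.List.pyGetD row k 0)
      = rowVals row n := by
  rw [PySem.List.pyRange_one]
  simp [rowVals, List.map_map, Function.comp_def]

theorem ksr_eq (n : Nat) :
    PySem.List.pyRange ((n : Int) - 1) (-1) (-1) = (PySem.List.pyRange 0 (n : Int) 1).reverse := by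
  rw [PySem.List.pyRange_neg_one_eq_reverse]
  norm_num

-- min of the two sweeps = min cyclic distance to a 1 of the row (first n cells)
def cyc (n t k : Nat) : Nat := min ((k + n - t) % n) ((t + n - k) % n)

theorem bRowDist_rep (row : List Int) (n : Nat) :
    bRowDist row (n : Int) =
      List.zipWith (fun f b => min f b)
        (pScan ((pScan ((rowVals row n).length : Int) (rowVals row n)).getLastD
            ((rowVals row n).length : Int)) (rowVals row n))
        ((pScan ((pScan (((rowVals row n).reverse).length : Int) ((rowVals row n).reverse)).getLastD
            (((rowVals row n).reverse).length : Int)) ((rowVals row n).reverse)).reverse) := by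
  unfold bRowDist
  rw [ksr_eq]
  simp only [bPass_eq_pScan, List.map_reverse, ks_map, List.length_reverse, rowVals_length]

theorem bRowDist_length (row : List Int) (n : Nat) :
    (bRowDist row (n : Int)).length = n := by
  rw [bRowDist_rep]
  simp [pScan_length, rowVals_length]

theorem bRowDist_char (row : List Int) (n k : Nat)
    (hone : ∃ t < n, row.getD t 0 = 1) (hk : k < n) :
    ∃ t < n, row.getD t 0 = 1 ∧
      (bRowDist row (n : Int)).getD k 0 = ((cyc n t k : Nat) : Int) ∧
      ∀ t' < n, row.getD t' 0 = 1 →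
        (bRowDist row (n : Int)).getD k 0 ≤ ((cyc n t' k : Nat) : Int) := by
  have hlw : (rowVals row n).length = n := rowVals_length row n
  have honew : ∃ t < (rowVals row n).length, (rowVals row n).getD t 0 = 1 := by
    obtain ⟨t, ht, h1⟩ := hone
    exact ⟨t, by omega, by rw [rowVals_getD row n t ht]; exact h1⟩
  have honerev : ∃ t < ((rowVals row n).reverse).length, ((rowVals row n).reverse).getD t 0 = 1 := by
    obtain ⟨t, ht, h1⟩ := honew
    refine ⟨(rowVals row n).length - 1 - t, by simp only [List.length_reverse]; omega, ?_⟩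
    rw [getD_reverse _ _ (by omega)]
    have he : (rowVals row n).length - 1 - ((rowVals row n).length - 1 - t) = t := by omega
    rw [he]
    exact h1
  obtain ⟨ta, hta, honea, heqa, hmina⟩ := fwd_char (rowVals row n) k honew (by omega)
  obtain ⟨tb', htb', honeb', heqb, hminb⟩ :=
    fwd_char ((rowVals row n).reverse) (n - 1 - k) honerev
      (by simp only [List.length_reverse]; omega)
  simp only [List.length_reverse, hlw] at hta honea heqa hmina htb' honeb' heqb hminb
  rw [rowVals_getD _ _ _ hta] at honea
  rw [getD_reverse _ _ (by omega)] at honeb'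
  simp only [hlw] at honeb'
  rw [rowVals_getD _ _ _ (by omega : n - 1 - tb' < n)] at honeb'
  have he2 : n - 1 - k + n - tb' = (n - 1 - tb') + n - k := by omega
  rw [he2] at heqb
  rw [bRowDist_rep]
  rw [zipWith_getD _ _ _ k (by rw [pScan_length, hlw]; exact hk)
        (by simp only [List.length_reverse, pScan_length, hlw]; exact hk)]
  rw [getD_reverse _ k (by simp only [pScan_length, List.length_reverse, hlw]; exact hk)]
  simp only [pScan_length, List.length_reverse, hlw]
  rw [heqa, heqb]
  -- minimality of the min over all ones
  have hminD : ∀ t' < n, row.getD t' 0 = 1 →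
      min (((k + n - ta) % n : Nat) : Int) ((((n - 1 - tb') + n - k) % n : Nat) : Int)
        ≤ ((cyc n t' k : Nat) : Int) := by
    intro t' ht' hone'
    have honew' : (rowVals row n).getD t' 0 = 1 := by rw [rowVals_getD _ _ _ ht']; exact hone'
    have h1 := hmina t' (by omega) honew'
    have h2 : ((rowVals row n).reverse).getD (n - 1 - t') 0 = 1 := by
      rw [getD_reverse _ _ (by omega)]
      simp only [hlw]
      have he : n - 1 - (n - 1 - t') = t' := by omega
      rw [he]
      exact honew'
    have h3 := hminb (n - 1 - t') (by omega) h2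
    have he3 : n - 1 - k + n - (n - 1 - t') = t' + n - k := by omega
    rw [he3] at h3
    rw [heqa] at h1
    rw [heqb] at h3
    unfold cyc
    push_cast [Nat.cast_min]
    apply le_min
    · exact le_trans (min_le_left _ _) h1
    · exact le_trans (min_le_right _ _) h3
  rcases le_total (((k + n - ta) % n : Nat) : Int) ((((n - 1 - tb') + n - k) % n : Nat) : Int)
      with hle | hle
  · refine ⟨ta, by omega, honea, ?_, hminD⟩
    rw [min_eq_left hle]
    have h2 := hminD ta (by omega) honea
    rw [min_eq_left hle] at h2
    have h3 : ((cyc n ta k : Nat) : Int) ≤ (((k + n - ta) % n : Nat) : Int) := by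
      unfold cyc
      push_cast [Nat.cast_min]
      exact min_le_left _ _
    omega
  · refine ⟨n - 1 - tb', by omega, honeb', ?_, hminD⟩
    rw [min_eq_right hle]
    have h2 := hminD (n - 1 - tb') (by omega) honeb'
    rw [min_eq_right hle] at h2
    have h3 : ((cyc n (n - 1 - tb') k : Nat) : Int) ≤ ((((n - 1 - tb') + n - k) % n : Nat) : Int) := by
      unfold cyc
      push_cast [Nat.cast_min]
      exact min_le_right _ _
    omega

-- ---- A-side: the ones list and the fold of mins ----

theorem pymod_sub (t k n : Nat) (ht : t < n) (hk : k < n) :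
    PySem.Int.mod ((t : Int) - (k : Int)) (n : Int) = (((t + n - k) % n : Nat) : Int) := by
  have hn : (0 : Int) < (n : Int) := by exact_mod_cast Nat.pos_of_ne_zero (by omega)
  rw [PySem.Int.mod_eq_emod_of_pos hn]
  have h : (t : Int) - k = ((t + n - k : Nat) : Int) - (n : Int) := by push_cast; omega
  rw [h, Int.sub_emod_right]
  norm_cast

theorem foldl_min_char (g : Int → Int) (l : List Int) : ∀ init : Int,
    (l.foldl (fun b t => min b (g t)) init = init ∨
      ∃ x ∈ l, l.foldl (fun b t => min b (g t)) init = g x) ∧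
    l.foldl (fun b t => min b (g t)) init ≤ init ∧
    ∀ x ∈ l, l.foldl (fun b t => min b (g t)) init ≤ g x := by
  induction l with
  | nil => simp
  | cons y ys ih =>
    intro init
    obtain ⟨h1, h2, h3⟩ := ih (min init (g y))
    refine ⟨?_, ?_, ?_⟩
    · rcases h1 with h | ⟨x, hx, hfx⟩
      · rcases le_total init (g y) with hle | hle
        · left; simpa [min_eq_left hle] using h
        · right; exact ⟨y, by simp, by simpa [min_eq_right hle] using h⟩
      · right; exact ⟨x, by simp [hx], by simpa using hfx⟩
    · simp only [List.foldl_cons]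
      exact le_trans h2 (min_le_left _ _)
    · intro x hx
      rcases List.mem_cons.mp hx with rfl | hx'
      · simp only [List.foldl_cons]
        exact le_trans h2 (min_le_right _ _)
      · simpa using h3 x hx'

theorem aOnes_mem (row : List Int) (n : Nat) (x : Int) :
    x ∈ aOnes row (n : Int) ↔ ∃ t < n, row.getD t 0 = 1 ∧ x = (t : Int) := by
  unfold aOnes
  rw [PySem.List.foldl_append_ite_eq_filter]
  simp only [List.nil_append, List.mem_filter, PySem.List.pyRange_one]
  constructor
  · rintro ⟨hmem, hp⟩
    simp only [List.mem_map, List.mem_range] at hmem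
    obtain ⟨t, ht, rfl⟩ := hmem
    simp only [zero_add] at hp ⊢
    refine ⟨t, ht, ?_, rfl⟩
    simpa using of_decide_eq_true hp
  · rintro ⟨t, ht, h1, rfl⟩
    have h1' : row[t]?.getD 0 = 1 := by rw [← List.getD_eq_getElem?_getD]; exact h1
    refine ⟨?_, ?_⟩
    · simp only [List.mem_map, List.mem_range]
      exact ⟨t, ht, by ring⟩
    · simp [h1']

theorem aOnes_nil_iff (row : List Int) (n : Nat) :
    aOnes row (n : Int) = [] ↔ ∀ t < n, row.getD t 0 ≠ 1 := by
  rw [List.eq_nil_iff_forall_not_mem]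
  constructor
  · intro h t ht hone
    exact h (t : Int) ((aOnes_mem row n _).mpr ⟨t, ht, hone, rfl⟩)
  · intro h x hx
    obtain ⟨t, ht, hone, rfl⟩ := (aOnes_mem row n x).mp hx
    exact h t ht hone

theorem aBest_eq (row : List Int) (n k : Nat)
    (hone : ∃ t < n, row.getD t 0 = 1) (hk : k < n) :
    aBest (aOnes row (n : Int)) (n : Int) (k : Int) = (bRowDist row (n : Int)).getD k 0 := by
  obtain ⟨t0, ht0, hone0, heq0, hmin0⟩ := bRowDist_char row n k hone hk
  obtain ⟨h1, h2, h3⟩ := foldl_min_char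
    (fun t => min (PySem.Int.mod (t - (k : Int)) (n : Int)) (PySem.Int.mod ((k : Int) - t) (n : Int)))
    (aOnes row (n : Int)) (n : Int)
  have hg : ∀ t, t < n →
      min (PySem.Int.mod ((t : Int) - (k : Int)) (n : Int)) (PySem.Int.mod ((k : Int) - (t : Int)) (n : Int))
        = ((cyc n t k : Nat) : Int) := by
    intro t ht
    rw [pymod_sub t k n ht hk, pymod_sub k t n hk ht, ← Nat.cast_min]
    unfold cyc
    rw [min_comm]
  have hA : aBest (aOnes row (n : Int)) (n : Int) (k : Int) =
      (aOnes row (n : Int)).foldl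
        (fun b t => min b (min (PySem.Int.mod (t - (k : Int)) (n : Int))
          (PySem.Int.mod ((k : Int) - t) (n : Int)))) (n : Int) := rfl
  rw [hA, heq0]
  apply le_antisymm
  · have hm : (t0 : Int) ∈ aOnes row (n : Int) := (aOnes_mem row n _).mpr ⟨t0, ht0, hone0, rfl⟩
    have := h3 (t0 : Int) hm
    rw [hg t0 ht0] at this
    exact this
  · rcases h1 with h | ⟨x, hx, hfx⟩
    · rw [h]
      have hn0 : 0 < n := by omega
      have : cyc n t0 k < n := lt_of_le_of_lt (min_le_left _ _) (Nat.mod_lt _ hn0)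
      exact_mod_cast le_of_lt this
    · obtain ⟨t', ht', hone', rfl⟩ := (aOnes_mem row n x).mp hx
      rw [hfx, hg t' ht', ← heq0]
      exact hmin0 t' ht' hone'

theorem aCostRow_rep (ones : List Int) (n : Nat) :
    aCostRow ones (n : Int)
      = (PySem.List.pyRange 0 (n : Int) 1).map (fun j => aBest ones (n : Int) j) := by
  unfold aCostRow
  rw [PySem.List.foldl_append_singleton_eq_map]
  simp

theorem costRow_eq (row : List Int) (n : Nat) (hone : ∃ t < n, row.getD t 0 = 1) :
    aCostRow (aOnes row (n : Int)) (n : Int) = bRowDist row (n : Int) := by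
  apply List.ext_getElem
  · rw [aCostRow_rep, bRowDist_length]
    simp [PySem.List.length_pyRange_one]
  · intro k h1 h2
    have hk : k < n := by
      rw [bRowDist_length] at h2
      exact h2
    rw [← List.getD_eq_getElem (aCostRow (aOnes row (n : Int)) (n : Int)) 0 h1,
        ← List.getD_eq_getElem (bRowDist row (n : Int)) 0 h2]
    rw [aCostRow_rep]
    rw [← PySem.List.pyGetD_natCast]
    rw [PySem.List.pyGetD_map_pyRange _ n k _ hk]
    exact aBest_eq row n k hone hk

theorem bRowDist_nonneg (row : List Int) (n : Nat) (hone : ∃ t < n, row.getD t 0 = 1) :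
    ∀ x ∈ bRowDist row (n : Int), 0 ≤ x := by
  intro x hx
  obtain ⟨k, hk, hgx⟩ := List.mem_iff_getElem.mp hx
  have hk' : k < n := by
    rw [bRowDist_length] at hk
    exact hk
  obtain ⟨t0, ht0, hone0, heq0, hmin0⟩ := bRowDist_char row n k hone hk'
  rw [← List.getD_eq_getElem _ 0 hk] at hgx
  rw [← hgx, heq0]
  exact_mod_cast Nat.zero_le _

-- ---- outer structure: rows, column sums, final min ----

-- shape of a matrix on which A's row loop raises no IndexError
def GoodRows (n : Nat) : List (List Int) → Prop
  | [] => True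
  | r :: rs => n ≤ r.length ∧ ((∃ t < n, r.getD t 0 = 1) → GoodRows n rs)

theorem good_of_forall (n : Nat) : ∀ rows : List (List Int),
    (∀ i < rows.length,
      (∀ i' < i, ∃ c < n, (rows.getD i' []).getD c 0 = 1) → n ≤ (rows.getD i []).length) →
    GoodRows n rows := by
  intro rows
  induction rows with
  | nil => intro _; trivial
  | cons r rs ih =>
    intro h
    refine ⟨?_, ?_⟩
    · have := h 0 (by simp) (by intro i' hi'; exact absurd hi' (Nat.not_lt_zero _))
      simpa using this
    · intro hone
      apply ih
      intro i hi hprev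
      have hante : ∀ i' < i + 1, ∃ c < n, ((r :: rs).getD i' []).getD c 0 = 1 := by
        intro i' hi'
        cases i' with
        | zero => simpa using hone
        | succ i'' =>
          have := hprev i'' (by omega)
          simpa using this
      have := h (i + 1) (by simpa using Nat.succ_lt_succ hi) hante
      simpa using this

theorem allcheck_iff (row : List Int) (n : Nat) :
    ((PySem.List.pyRange 0 (n : Int) 1).all
        (fun c => PySem.List.pyGetD row c 0 != 1) = true)
      ↔ ∀ t < n, row.getD t 0 ≠ 1 := by
  rw [PySem.List.pyRange_one]
  simp [List.all_eq_true, List.mem_range, bne_iff_ne, List.getD_eq_getElem?_getD]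

def totalsOf (sums : List Int) : List (List Int) → List Int
  | [] => sums
  | c :: rest => totalsOf (List.zipWith (fun s d => s + d) sums c) rest

theorem totalsOf_length (cost : List (List Int)) : ∀ sums : List Int,
    (∀ c ∈ cost, c.length = sums.length) → (totalsOf sums cost).length = sums.length := by
  induction cost with
  | nil => intro sums _; rfl
  | cons c rest ih =>
    intro sums h
    have hz : (List.zipWith (fun s d => s + d) sums c).length = sums.length := by
      rw [List.length_zipWith, h c (by simp), min_self]
    rw [totalsOf, ih _ (by intro c' hc'; rw [hz]; exact h c' (by simp [hc'])), hz]

theorem totalsOf_getD (cost : List (List Int)) : ∀ (sums : List Int) (j : Nat),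
    j < sums.length → (∀ c ∈ cost, c.length = sums.length) →
    (totalsOf sums cost).getD j 0 =
      sums.getD j 0 + cost.foldl (fun t cr => t + PySem.List.pyGetD cr (j : Int) 0) 0 := by
  induction cost with
  | nil => intro sums j _ _; simp [totalsOf]
  | cons c rest ih =>
    intro sums j hj h
    have hcl : c.length = sums.length := h c (by simp)
    have hz : (List.zipWith (fun s d => s + d) sums c).length = sums.length := by
      rw [List.length_zipWith, hcl, min_self]
    rw [totalsOf, ih _ j (by omega) (by intro c' hc'; rw [hz]; exact h c' (by simp [hc']))]
    rw [zipWith_getD _ _ _ j hj (by omega)]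
    rw [List.foldl_cons]
    simp only [PySem.List.foldl_add]
    have : PySem.List.pyGetD c ((j : Nat) : Int) 0 = c.getD j 0 := by simp
    rw [this]
    ring

theorem totalsOf_nonneg (cost : List (List Int)) : ∀ sums : List Int,
    (∀ x ∈ sums, 0 ≤ x) → (∀ c ∈ cost, ∀ x ∈ c, 0 ≤ x) →
    ∀ x ∈ totalsOf sums cost, 0 ≤ x := by
  induction cost with
  | nil => intro sums h _; exact h
  | cons cr rest ih =>
    intro sums hs hc
    apply ih
    · intro x hx
      obtain ⟨i, hi, hgx⟩ := List.mem_iff_getElem.mp hx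
      have ha : i < sums.length := by
        rw [List.length_zipWith] at hi
        omega
      have hb : i < cr.length := by
        rw [List.length_zipWith] at hi
        omega
      rw [List.getElem_zipWith] at hgx
      rw [← hgx]
      have h1 : 0 ≤ sums[i]'ha := hs _ (List.getElem_mem _)
      have h2 : 0 ≤ cr[i]'hb := hc cr (by simp) _ (List.getElem_mem _)
      omega
    · intro c' hc'
      exact hc c' (by simp [hc'])

theorem aRows_props (n : Nat) : ∀ rows cost, GoodRows n rows → aRows (n : Int) rows = some cost →
    ∀ c ∈ cost, c.length = n ∧ ∀ x ∈ c, 0 ≤ x := by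
  intro rows
  induction rows with
  | nil =>
    intro cost _ h
    simp [aRows] at h
    subst h
    simp
  | cons r rs ih =>
    intro cost hg h
    by_cases ho : aOnes r (n : Int) = []
    · simp [aRows, ho] at h
    · have hone : ∃ t < n, r.getD t 0 = 1 := by
        by_contra hno
        push_neg at hno
        exact ho ((aOnes_nil_iff r n).mpr hno)
      cases har : aRows (n : Int) rs with
      | none => simp [aRows, ho, har] at h
      | some rest =>
        simp [aRows, ho, har] at h
        subst h
        intro c hc
        rcases List.mem_cons.mp hc with rfl | hc'
        · rw [costRow_eq r n hone]
          exact ⟨bRowDist_length r n, bRowDist_nonneg r n hone⟩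
        · exact ih rest (hg.2 hone) har c hc'

theorem bLoop_eq (n : Nat) : ∀ rows, GoodRows n rows → ∀ sums : List Int, sums.length = n →
    bLoop (n : Int) sums rows =
      (match aRows (n : Int) rows with
       | none => (-1 : Int)
       | some cost => (PySem.List.min? (totalsOf sums cost) (fun x => x)).getD (-1)) := by
  intro rows
  induction rows with
  | nil => intro _ sums _; rfl
  | cons r rs ih =>
    intro hg sums hlen
    obtain ⟨hlenr, hrec⟩ := hg
    by_cases hone : ∃ t < n, r.getD t 0 = 1
    · have hcheck : ¬ ((PySem.List.pyRange 0 (n : Int) 1).all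
          (fun c => PySem.List.pyGetD r c 0 != 1) = true) := by
        rw [allcheck_iff]
        push_neg
        obtain ⟨t, ht, h1⟩ := hone
        exact ⟨t, ht, h1⟩
      have ho : aOnes r (n : Int) ≠ [] := by
        rw [Ne, aOnes_nil_iff]
        push_neg
        obtain ⟨t, ht, h1⟩ := hone
        exact ⟨t, ht, h1⟩
      have hzlen : (List.zipWith (fun s d => s + d) sums (bRowDist r (n : Int))).length = n := by
        rw [List.length_zipWith, hlen, bRowDist_length, min_self]
      simp only [bLoop]
      rw [if_neg hcheck]
      rw [ih (hrec hone) _ hzlen]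
      have ha : aRows (n : Int) (r :: rs) =
          (match aRows (n : Int) rs with
           | none => none
           | some rest => some (aCostRow (aOnes r (n : Int)) (n : Int) :: rest)) := by
        simp [aRows, ho]
      rw [ha]
      cases har : aRows (n : Int) rs with
      | none => simp
      | some rest =>
        simp only []
        have hstep : totalsOf sums (aCostRow (aOnes r (n : Int)) (n : Int) :: rest)
            = totalsOf (List.zipWith (fun s d => s + d) sums
                (aCostRow (aOnes r (n : Int)) (n : Int))) rest := rfl
        rw [hstep, costRow_eq r n hone]
    · have hno : ∀ t < n, r.getD t 0 ≠ 1 := by push_neg at hone; exact hone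
      have hcheck := (allcheck_iff r n).mpr hno
      have ho : aOnes r (n : Int) = [] := (aOnes_nil_iff r n).mpr hno
      simp only [bLoop]
      rw [if_pos hcheck]
      have ha : aRows (n : Int) (r :: rs) = none := by simp [aRows, ho]
      rw [ha]

theorem foldl_res_aux (rest : List Int) : ∀ acc : Int, 0 ≤ acc → (∀ x ∈ rest, 0 ≤ x) →
    rest.foldl (fun res t => min (if res = -1 then t else res) t) acc
      = rest.foldl min acc := by
  induction rest with
  | nil => intro _ _ _; rfl
  | cons x xs ih =>
    intro acc hacc hnn
    simp only [List.foldl_cons]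
    have h1 : (if acc = -1 then x else acc) = acc := if_neg (by omega)
    rw [h1]
    exact ih _ (le_min hacc (hnn x (by simp))) (fun y hy => hnn y (by simp [hy]))

theorem resfold_eq (T : List Int) (hne : T ≠ []) (hnn : ∀ x ∈ T, 0 ≤ x) :
    T.foldl (fun res t => min (if res = -1 then t else res) t) (-1)
      = (PySem.List.min? T (fun x => x)).getD (-1) := by
  cases T with
  | nil => exact absurd rfl hne
  | cons t0 rest =>
    rw [PySem.List.min?_id_cons]
    simp only [Option.getD_some, List.foldl_cons]
    simp only [if_true, min_self]
    exact foldl_res_aux rest t0 (hnn t0 (by simp)) (fun y hy => hnn y (by simp [hy]))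

-- ===== VERDICT (by name: the statement is the Claim_ definition above) =====
theorem minShifts_spec : Claim_equal_minShifts := by
  intro matrix hdom hpre
  unfold Spec_minShifts
  obtain ⟨hne, hidx⟩ := hpre
  cases matrix with
  | nil => exact absurd rfl hne
  | cons r0 rs =>
    simp only [List.headD_cons] at hidx
    have hgood : GoodRows r0.length (r0 :: rs) := good_of_forall _ _ hidx
    have hB : minShifts_alt (r0 :: rs)
        = (match aRows ((r0.length : Nat) : Int) (r0 :: rs) with
           | none => (-1 : Int)
           | some cost =>
             (PySem.List.min? (totalsOf (List.replicate r0.length 0) cost) (fun x => x)).getD (-1)) := by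
      have h0 : minShifts_alt (r0 :: rs)
          = bLoop ((r0.length : Nat) : Int)
              (List.replicate (((r0.length : Nat) : Int)).toNat 0) (r0 :: rs) := rfl
      rw [h0]
      have h1 : (((r0.length : Nat) : Int)).toNat = r0.length := by simp
      rw [h1]
      exact bLoop_eq r0.length (r0 :: rs) hgood _ (by simp)
    rw [hB]
    have hA0 : minShifts (r0 :: rs)
        = (match aRows ((r0.length : Nat) : Int) (r0 :: rs) with
           | none => (-1 : Int)
           | some cost =>
             (PySem.List.pyRange 0 ((r0.length : Nat) : Int) 1).foldl
               (fun res j =>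
                 let total := cost.foldl (fun t cr => t + PySem.List.pyGetD cr j 0) 0
                 let res := if res = -1 then total else res
                 min res total) (-1)) := rfl
    rw [hA0]
    cases har : aRows ((r0.length : Nat) : Int) (r0 :: rs) with
    | none => rfl
    | some cost =>
      simp only []
      have hprops := aRows_props r0.length (r0 :: rs) cost hgood har
      have hone0 : ∃ t < r0.length, r0.getD t 0 = 1 := by
        by_contra hno
        push_neg at hno
        have ho : aOnes r0 ((r0.length : Nat) : Int) = [] := (aOnes_nil_iff _ _).mpr hno
        simp [aRows, ho] at har
      have hn1 : 0 < r0.length := by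
        obtain ⟨t, ht, _⟩ := hone0
        omega
      have hclen : ∀ c ∈ cost, c.length = (List.replicate r0.length (0 : Int)).length := by
        intro c hc
        rw [List.length_replicate]
        exact (hprops c hc).1
      have hTlen : (totalsOf (List.replicate r0.length (0 : Int)) cost).length = r0.length := by
        rw [totalsOf_length cost _ hclen, List.length_replicate]
      have hTne : totalsOf (List.replicate r0.length (0 : Int)) cost ≠ [] := by
        intro h
        rw [h] at hTlen
        simp at hTlen
        omega
      have hTnn : ∀ x ∈ totalsOf (List.replicate r0.length (0 : Int)) cost, 0 ≤ x := by
        refine totalsOf_nonneg cost _ ?_ (fun c hc => (hprops c hc).2)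
        intro x hx
        rw [List.eq_of_mem_replicate hx]
      have hcongr : ∀ (res j : Int), j ∈ PySem.List.pyRange 0 ((r0.length : Nat) : Int) 1 →
          (fun res j =>
            min (if res = -1 then cost.foldl (fun t cr => t + PySem.List.pyGetD cr j 0) 0 else res)
              (cost.foldl (fun t cr => t + PySem.List.pyGetD cr j 0) 0)) res j
            = (fun res j =>
                min (if res = -1 then
                    PySem.List.pyGetD (totalsOf (List.replicate r0.length 0) cost) j 0
                  else res)
                  (PySem.List.pyGetD (totalsOf (List.replicate r0.length 0) cost) j 0)) res j := by
        intro res j hj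
        rw [PySem.List.mem_pyRange_one] at hj
        have hjn : j.toNat < r0.length := by omega
        have hjeq : j = ((j.toNat : Nat) : Int) := by omega
        simp only []
        have hv : PySem.List.pyGetD (totalsOf (List.replicate r0.length 0) cost) j 0
            = cost.foldl (fun t cr => t + PySem.List.pyGetD cr j 0) 0 := by
          rw [hjeq, PySem.List.pyGetD_natCast]
          rw [totalsOf_getD cost _ j.toNat (by simpa using hjn) hclen]
          simp
        rw [hv]
      rw [PySem.List.foldl_congr_mem _ _ _ _ hcongr]
      have hrange : ((r0.length : Nat) : Int)
          = ((totalsOf (List.replicate r0.length (0 : Int)) cost).length : Int) := by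
        rw [hTlen]
      rw [hrange]
      rw [PySem.List.foldl_pyRange_zero_pyGetD'
            (totalsOf (List.replicate r0.length (0 : Int)) cost) 0
            (fun acc v => min (if acc = -1 then v else acc) v) (-1)]
      exact resfold_eq _ hTne hTnn
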